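-- pv_equiv track=rewrite | github.com/MrBrantCode/unitest_baseline | mut_generate/mist_train_cf/cf_90845/solution.py | count_lowercase
-- ===== SOURCE A (Python) =====
-- def count_lowercase(str):
--     if len(str) == 0:  # base case: empty string
--         return 0
--     elif str[0] == 'a':  # excluding 'a'
--         return count_lowercase(str[1:])
--     elif str[0].islower():  # lowercase alphabets
--         return 1 + count_lowercase(str[1:])
--     else:  # non-lowercase alphabets
--         return count_lowercase(str[1:])
-- ===== SOURCE B (Python) =====
-- def count_lowercase(str):
--     n = 0
--     for c in str:
--         if c.islower() and c != 'a':
--             n += 1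
--     return n
-- ===== Notes on version B (the rewrite author's own statement) =====
-- stated objective: simpler
-- what changed: Replaced the per-character tail recursion that slices str[1:] at each step with a flat iterative single pass over the string keeping an explicit counter.
import Mathlib
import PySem

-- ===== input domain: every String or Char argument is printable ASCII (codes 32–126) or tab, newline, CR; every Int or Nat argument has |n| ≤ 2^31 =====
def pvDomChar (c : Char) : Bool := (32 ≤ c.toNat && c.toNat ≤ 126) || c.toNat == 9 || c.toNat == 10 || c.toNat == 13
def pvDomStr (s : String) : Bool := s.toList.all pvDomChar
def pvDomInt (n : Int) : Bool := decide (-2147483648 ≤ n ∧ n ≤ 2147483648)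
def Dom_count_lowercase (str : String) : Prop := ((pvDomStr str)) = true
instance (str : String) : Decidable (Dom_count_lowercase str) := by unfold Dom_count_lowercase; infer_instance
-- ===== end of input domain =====

-- B replaces A's per-character tail recursion (which slices str[1:] each step) with a
-- flat single-pass loop over the characters keeping an explicit counter (objective: simpler).

-- ===== PORT A =====
-- A recurses on the string, peeling the first character; ported as structural recursion on the char list.
def countA : List Char → Int
  | [] => 0
  | c :: rest =>
    if c = 'a' then countA rest
    else if PySem.Chars.islower c then 1 + countA rest
    else countA rest

def count_lowercase (str : String) : Int := countA str.toList

-- ===== PORT B =====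
-- B is an explicit accumulator loop: for c in str, bump n when c.islower() and c != 'a'.
def count_lowercase_alt (str : String) : Int :=
  str.toList.foldl (fun n c => if PySem.Chars.islower c && c != 'a' then n + 1 else n) 0

-- ===== PRECONDITION & SPEC =====
def Spec_count_lowercase (str : String) (out : Int) : Prop := out = count_lowercase_alt str
instance (str : String) (out : Int) : Decidable (Spec_count_lowercase str out) := by unfold Spec_count_lowercase; infer_instance

-- ===== CLAIM (what is proved, stated in full; the proofs are below) =====
def Claim_equal_count_lowercase : Prop := ∀ (str : String), Dom_count_lowercase str → Spec_count_lowercase str (count_lowercase str)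

-- ===== LEMMAS AND PROOFS =====
theorem foldl_eq_countA (l : List Char) (acc : Int) :
    l.foldl (fun n c => if PySem.Chars.islower c && c != 'a' then n + 1 else n) acc
      = acc + countA l := by
  induction l generalizing acc with
  | nil => simp [countA]
  | cons c rest ih =>
    rw [List.foldl_cons, ih]
    by_cases ha : c = 'a'
    · subst ha; simp [countA]
    · by_cases hl : PySem.Chars.islower c = true
      · simp [countA, hl, ha]; ring
      · simp [countA, hl, ha]

-- ===== VERDICT (by name: the statement is the Claim_ definition above) =====
theorem count_lowercase_spec : Claim_equal_count_lowercase := by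
  intro str _
  unfold Spec_count_lowercase count_lowercase count_lowercase_alt
  rw [foldl_eq_countA]
  ring
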